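-- pv_equiv track=rewrite | github.com/IntelPython/dpnp | dpnp/fft/dpnp_utils_fft.py | _extract_axes_chunk
-- ===== SOURCE A (Python) =====
-- def _extract_axes_chunk(a, s, chunk_size=3):
--     """
--     Classify the first input into a list of lists with each list containing
--     only unique values in reverse order and its length is at most `chunk_size`.
--     The second input is also classified into a list of lists with each list
--     containing the corresponding values of the first input.
--
--     Parameters
--     ----------
--     a : list or tuple of ints
--         The first input.
--     s : list or tuple of ints
--         The second input.
--     chunk_size : int
--         Maximum number of elements in each chunk.
--
--     Return
--     ------
--     out : a tuple of two lists
--         The first element of output is a list of lists with each list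
--         containing only unique values in revere order and its length is
--         at most `chunk_size`.
--         The second element of output is a list of lists with each list
--         containing the corresponding values of the first input.
--
--     Examples
--     --------
--     >>> axes = (0, 1, 2, 3, 4)
--     >>> shape = (7, 8, 10, 9, 5)
--     >>> _extract_axes_chunk(axes, shape, chunk_size=3)
--     ([[4, 3], [2, 1, 0]], [[5, 9], [10, 8, 7]])
--
--     >>> axes = (1, 0, 3, 2, 4, 4)
--     >>> shape = (7, 8, 10, 5, 7, 6)
--     >>> _extract_axes_chunk(axes, shape, chunk_size=3)
--     ([[4], [4, 2], [3, 0, 1]], [[6], [7, 5], [10, 8, 7]])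
--
--     """
--
--     a_chunks = []
--     a_current_chunk = []
--     seen_elements = set()
--
--     s_chunks = []
--     s_current_chunk = []
--
--     for a_elem, s_elem in zip(a, s):
--         if a_elem in seen_elements:
--             # If element is already seen, start a new chunk
--             a_chunks.append(a_current_chunk[::-1])
--             s_chunks.append(s_current_chunk[::-1])
--             a_current_chunk = [a_elem]
--             s_current_chunk = [s_elem]
--             seen_elements = {a_elem}
--         else:
--             a_current_chunk.append(a_elem)
--             s_current_chunk.append(s_elem)
--             seen_elements.add(a_elem)
--
--         if len(a_current_chunk) == chunk_size:
--             a_chunks.append(a_current_chunk[::-1])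
--             s_chunks.append(s_current_chunk[::-1])
--             a_current_chunk = []
--             s_current_chunk = []
--             seen_elements = set()
--
--     # Add the last chunk if it's not empty
--     if a_current_chunk:
--         a_chunks.append(a_current_chunk[::-1])
--         s_chunks.append(s_current_chunk[::-1])
--
--     return a_chunks[::-1], s_chunks[::-1]
-- ===== SOURCE B (Python) =====
-- def _extract_axes_chunk(a, s, chunk_size=3):
--     a = list(a)
--     s = list(s)
--     n = min(len(a), len(s))
--     # phase 1: build an index table of chunk boundaries (start, end),
--     # using the same two flush rules (duplicate in current window; window
--     # length reaching chunk_size), but testing duplicates against the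
--     # slice a[start:i] instead of maintaining chunk/seen accumulators
--     ranges = []
--     start = 0
--     for i, elem in enumerate(a[:n]):
--         if elem in a[start:i]:
--             ranges.append((start, i))
--             start = i
--         if i - start + 1 == chunk_size:
--             ranges.append((start, i + 1))
--             start = i + 1
--     if start < n:
--         ranges.append((start, n))
--     # phase 2: slice out each chunk, reverse each, reverse the chunk lists
--     a_chunks = [a[st:en][::-1] for st, en in ranges]
--     s_chunks = [s[st:en][::-1] for st, en in ranges]
--     return a_chunks[::-1], s_chunks[::-1]
-- ===== Notes on version B (the rewrite author's own statement) =====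
-- stated objective: alternative
-- what changed: Replaces A's single scan that maintains chunk/seen accumulators with a two-phase index-table scheme: a first pass records only (start, end) chunk-boundary ranges (duplicates detected by membership in the slice a[start:i]), a second pass slices and reverses each chunk from the ranges.
import Mathlib
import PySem

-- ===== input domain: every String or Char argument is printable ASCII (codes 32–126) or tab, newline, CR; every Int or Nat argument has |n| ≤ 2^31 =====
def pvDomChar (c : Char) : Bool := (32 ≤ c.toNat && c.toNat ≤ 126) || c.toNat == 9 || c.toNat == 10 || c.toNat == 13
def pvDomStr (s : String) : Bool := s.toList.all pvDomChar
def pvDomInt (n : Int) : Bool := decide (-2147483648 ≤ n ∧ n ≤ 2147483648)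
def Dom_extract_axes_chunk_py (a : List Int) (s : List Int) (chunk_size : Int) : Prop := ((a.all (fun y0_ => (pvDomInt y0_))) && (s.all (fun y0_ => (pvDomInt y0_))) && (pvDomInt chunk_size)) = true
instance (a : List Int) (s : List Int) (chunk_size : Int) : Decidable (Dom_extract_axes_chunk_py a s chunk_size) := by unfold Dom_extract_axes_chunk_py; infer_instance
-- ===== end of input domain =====

-- B replaces A's accumulator scan with a two-phase index-table scheme (first record
-- chunk boundaries, then slice); same cost, different decomposition ("alternative").

-- ===== PORT A =====
-- loop body of A's `for a_elem, s_elem in zip(a, s)`; state = (a_chunks, a_current_chunk, seen_elements, s_chunks, s_current_chunk)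
def pvAStep (chunk_size : Int)
    (st : List (List Int) × List Int × PySem.Set Int × List (List Int) × List Int)
    (p : Int × Int) :
    List (List Int) × List Int × PySem.Set Int × List (List Int) × List Int :=
  let st1 :=
    if PySem.Set.contains st.2.2.1 p.1 then
      (st.1 ++ [st.2.1.reverse], [p.1], PySem.Set.ofList [p.1],
       st.2.2.2.1 ++ [st.2.2.2.2.reverse], [p.2])
    else
      (st.1, st.2.1 ++ [p.1], PySem.Set.add st.2.2.1 p.1,
       st.2.2.2.1, st.2.2.2.2 ++ [p.2])
  if (st1.2.1.length : Int) = chunk_size then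
    (st1.1 ++ [st1.2.1.reverse], [], PySem.Set.empty,
     st1.2.2.2.1 ++ [st1.2.2.2.2.reverse], [])
  else st1

def extract_axes_chunk_py (a : List Int) (s : List Int) (chunk_size : Int) :
    List (List Int) × List (List Int) :=
  let fin := (List.zip a s).foldl (pvAStep chunk_size) ([], [], PySem.Set.empty, [], [])
  let res :=
    if fin.2.1 ≠ [] then
      (fin.1 ++ [fin.2.1.reverse], fin.2.2.2.1 ++ [fin.2.2.2.2.reverse])
    else (fin.1, fin.2.2.2.1)
  (res.1.reverse, res.2.reverse)

-- ===== PORT B =====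
-- loop body of B's `for i, elem in enumerate(a[:n])`; state = (ranges, start)
def pvBStep (a : List Int) (chunk_size : Int)
    (st : List (Int × Int) × Int) (p : Int × Int) : List (Int × Int) × Int :=
  let st1 :=
    if (PySem.List.slice a (some st.2) (some p.1)).contains p.2 then
      (st.1 ++ [(st.2, p.1)], p.1)
    else st
  if p.1 - st1.2 + 1 = chunk_size then (st1.1 ++ [(st1.2, p.1 + 1)], p.1 + 1)
  else st1

def extract_axes_chunk_py_alt (a : List Int) (s : List Int) (chunk_size : Int) :
    List (List Int) × List (List Int) :=
  let n : Int := min (a.length : Int) (s.length : Int)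
  let fin := (PySem.List.enumerate (PySem.List.slice a none (some n)) 0).foldl
    (pvBStep a chunk_size) ([], 0)
  let ranges := if fin.2 < n then fin.1 ++ [(fin.2, n)] else fin.1
  let aCh := ranges.map (fun r => (PySem.List.slice a (some r.1) (some r.2)).reverse)
  let sCh := ranges.map (fun r => (PySem.List.slice s (some r.1) (some r.2)).reverse)
  (aCh.reverse, sCh.reverse)

-- ===== PRECONDITION & SPEC =====
def Spec_extract_axes_chunk_py (a : List Int) (s : List Int) (chunk_size : Int) (out : List (List Int) × List (List Int)) : Prop := out = extract_axes_chunk_py_alt a s chunk_size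
instance (a : List Int) (s : List Int) (chunk_size : Int) (out : List (List Int) × List (List Int)) : Decidable (Spec_extract_axes_chunk_py a s chunk_size out) := by unfold Spec_extract_axes_chunk_py; infer_instance

-- ===== CLAIM (what is proved, stated in full; the proofs are below) =====
def Claim_equal_extract_axes_chunk_py : Prop := ∀ (a : List Int) (s : List Int) (chunk_size : Int), Dom_extract_axes_chunk_py a s chunk_size → Spec_extract_axes_chunk_py a s chunk_size (extract_axes_chunk_py a s chunk_size)

-- ===== LEMMAS AND PROOFS =====


-- the chunk of l between absolute indices st and i (forward order)
def pvSeg (l : List Int) (st i : Nat) : List Int := (l.take i).drop st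

lemma pvSlice_eq_seg (l : List Int) (st i : Nat) :
    PySem.List.slice l (some (st : Int)) (some (i : Int)) = pvSeg l st i := by
  rw [PySem.List.slice_natCast]
  exact List.extract_eq_drop_take' ..

lemma pvSeg_self (l : List Int) (i : Nat) : pvSeg l i i = [] := by
  simp [pvSeg]

lemma pvSeg_succ (l : List Int) (st i : Nat) (hst : st ≤ i) (hil : i < l.length) :
    pvSeg l st (i + 1) = pvSeg l st i ++ [l[i]] := by
  unfold pvSeg
  rw [List.take_add_one, List.getElem?_eq_getElem hil,
      List.drop_append_of_le_length (by simp; omega)]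
  simp

lemma pvSeg_singleton (l : List Int) (i : Nat) (hil : i < l.length) :
    pvSeg l i (i + 1) = [l[i]] := by
  rw [pvSeg_succ l i i le_rfl hil, pvSeg_self]
  simp

lemma pvSeg_length (l : List Int) (st i : Nat) (hst : st ≤ i) (hil : i ≤ l.length) :
    (pvSeg l st i).length = i - st := by
  simp [pvSeg]
  omega

lemma pvOfList_snoc (l : List Int) (x : Int) :
    PySem.Set.ofList (l ++ [x]) = PySem.Set.add (PySem.Set.ofList l) x := by
  simp [PySem.Set.ofList_eq_foldl, List.foldl_append]

lemma pvContains_ofList (l : List Int) (x : Int) :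
    PySem.Set.contains (PySem.Set.ofList l) x = l.contains x := by
  simp [pysem]

-- The invariant tying A's accumulator state after i steps to B's (ranges, start) state.
def pvInv (a s : List Int) (cs : Int) (i : Nat) : Prop :=
  ∃ (rs : List (Int × Int)) (st : Nat), st ≤ i ∧
    ((PySem.List.enumerate (PySem.List.slice a none
        (some (min (a.length : Int) (s.length : Int)))) 0).take i).foldl
        (pvBStep a cs) ([], 0) = (rs, (st : Int)) ∧
    ((List.zip a s).take i).foldl (pvAStep cs) ([], [], PySem.Set.empty, [], []) =
      (rs.map (fun r => (PySem.List.slice a (some r.1) (some r.2)).reverse),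
       pvSeg a st i,
       PySem.Set.ofList (pvSeg a st i),
       rs.map (fun r => (PySem.List.slice s (some r.1) (some r.2)).reverse),
       pvSeg s st i)

lemma pvInv_holds (a s : List Int) (cs : Int) (i : Nat)
    (h : i ≤ min a.length s.length) : pvInv a s cs i := by
  have hE : PySem.List.slice a none (some (min ((a.length : Nat) : Int) ((s.length : Nat) : Int)))
      = a.take (min a.length s.length) := by
    rw [← Nat.cast_min]
    exact PySem.List.slice_to_natCast ..
  induction i with
  | zero =>
      refine ⟨[], 0, le_rfl, by simp, ?_⟩
      simp [pvSeg]
  | succ i ih =>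
      obtain ⟨rs, st, hst, hB, hA⟩ := ih (Nat.le_of_succ_le h)
      have hia : i < a.length := by omega
      have his : i < s.length := by omega
      have hlen : (PySem.List.enumerate (a.take (min a.length s.length)) 0).length
          = min a.length s.length := by
        simp [PySem.List.length_enumerate]
      have hTake : (PySem.List.enumerate (a.take (min a.length s.length)) 0).take (i + 1)
          = (PySem.List.enumerate (a.take (min a.length s.length)) 0).take i
            ++ [((i : Int), a[i])] := by
        rw [List.take_add_one, PySem.List.getElem?_enumerate,
            List.getElem?_take_of_lt (by omega), List.getElem?_eq_getElem hia]
        simp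
      have hZTake : (List.zip a s).take (i + 1)
          = (List.zip a s).take i ++ [(a[i], s[i])] := by
        rw [List.take_add_one, List.getElem?_eq_getElem (by simp; omega)]
        simp
      unfold pvInv
      rw [hE] at hB ⊢
      rw [hTake, List.foldl_append, hB, hZTake, List.foldl_append, hA]
      simp only [List.foldl_cons, List.foldl_nil]
      simp only [pvAStep, pvBStep]
      simp only [pvSlice_eq_seg, pvContains_ofList]
      by_cases hmem : (pvSeg a st i).contains a[i]
      · -- duplicate: new chunk begins at i
        simp only [hmem, if_true]
        have hc1 : ((i : Int) + 1) = ((i + 1 : Nat) : Int) := by push_cast; ring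
        simp only [List.length_cons, List.length_nil, Nat.cast_one, sub_self, zero_add]
        by_cases hcs : ((1 : Int) = cs)
        · -- and it immediately flushes (chunk_size = 1)
          refine ⟨rs ++ [((st : Int), (i : Int))] ++ [((i : Int), ((i + 1 : Nat) : Int))], i + 1,
            le_rfl, ?_, ?_⟩
          · rw [if_pos hcs, hc1]
          · rw [if_pos hcs]
            simp [List.map_append, pvSlice_eq_seg, pvSeg_self,
              show PySem.Set.ofList ([] : List Int) = PySem.Set.empty from rfl]
            constructor <;> rw [hc1, pvSlice_eq_seg] <;>
              simp [pvSeg_singleton a i hia, pvSeg_singleton s i his]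
        · refine ⟨rs ++ [((st : Int), (i : Int))], i, by omega, ?_, ?_⟩
          · rw [if_neg hcs]
          · rw [if_neg hcs]
            simp [List.map_append, pvSlice_eq_seg, pvSeg_singleton a i hia,
              pvSeg_singleton s i his,
              show ∀ x : Int, PySem.Set.ofList [x] = [x] from fun _ => rfl]
      · -- no duplicate: extend the current chunk
        simp only [Bool.not_eq_true] at hmem
        simp only [hmem, Bool.false_eq_true, if_false]
        have hc1 : ((i : Int) + 1) = ((i + 1 : Nat) : Int) := by push_cast; ring
        have hsegA : pvSeg a st (i + 1) = pvSeg a st i ++ [a[i]] := pvSeg_succ a st i hst hia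
        have hsegS : pvSeg s st (i + 1) = pvSeg s st i ++ [s[i]] := pvSeg_succ s st i hst his
        have hlenA : (((pvSeg a st i ++ [a[i]]).length : Nat) : Int) = (i : Int) - (st : Int) + 1 := by
          rw [List.length_append, pvSeg_length a st i hst (by omega)]
          simp
          omega
        rw [hlenA]
        by_cases hcs : ((i : Int) - (st : Int) + 1 = cs)
        · refine ⟨rs ++ [((st : Int), ((i + 1 : Nat) : Int))], i + 1, le_rfl, ?_, ?_⟩
          · rw [if_pos hcs, hc1]
          · rw [if_pos hcs]
            simp only [List.map_append, List.map_cons, List.map_nil, pvSlice_eq_seg, pvSeg_self,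
              hsegA, hsegS]
            rfl
        · refine ⟨rs, st, by omega, ?_, ?_⟩
          · rw [if_neg hcs]
          · rw [if_neg hcs]
            rw [hsegA, hsegS, pvOfList_snoc]

theorem extract_axes_chunk_py_spec_aux (a s : List Int) (cs : Int) :
    extract_axes_chunk_py a s cs = extract_axes_chunk_py_alt a s cs := by
  obtain ⟨rs, st, hst, hB, hA⟩ := pvInv_holds a s cs (min a.length s.length) le_rfl
  have hE : PySem.List.slice a none (some (min ((a.length : Nat) : Int) ((s.length : Nat) : Int)))
      = a.take (min a.length s.length) := by
    rw [← Nat.cast_min]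
    exact PySem.List.slice_to_natCast ..
  have hlen : (PySem.List.enumerate (a.take (min a.length s.length)) 0).length
      = min a.length s.length := by
    simp [PySem.List.length_enumerate]
  rw [hE] at hB
  rw [List.take_of_length_le (le_of_eq hlen)] at hB
  rw [List.take_of_length_le (by simp)] at hA
  simp only [extract_axes_chunk_py, extract_axes_chunk_py_alt]
  rw [hE, hB, hA]
  have hsl : (pvSeg a st (min a.length s.length)).length = min a.length s.length - st :=
    pvSeg_length a st _ hst (by omega)
  by_cases hlt : st < min a.length s.length
  · have hne : pvSeg a st (min a.length s.length) ≠ [] := by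
      intro hnil
      rw [hnil] at hsl
      simp at hsl
      omega
    have hlt' : ((st : Int) < min ((a.length : Nat) : Int) ((s.length : Nat) : Int)) := by
      rw [← Nat.cast_min]
      exact_mod_cast hlt
    simp only [hne, hlt', if_true, ne_eq, not_false_eq_true]
    rw [← Nat.cast_min]
    simp [List.map_append]
    constructor <;> rw [← Nat.cast_min, pvSlice_eq_seg]
  · have hnil : pvSeg a st (min a.length s.length) = [] := by
      apply List.eq_nil_of_length_eq_zero
      omega
    have hge : ¬ ((st : Int) < min ((a.length : Nat) : Int) ((s.length : Nat) : Int)) := by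
      rw [← Nat.cast_min]
      exact_mod_cast hlt
    simp [hnil, hge]

-- ===== VERDICT (by name: the statement is the Claim_ definition above) =====
theorem extract_axes_chunk_py_spec : Claim_equal_extract_axes_chunk_py := by
  intro a s cs _
  exact extract_axes_chunk_py_spec_aux a s cs
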